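-- pv_equiv track=rewrite | github.com/Gandharthus/diverse_langgraph_projects | validators.py | extract_label_conflicts
-- ===== SOURCE A (Python) =====
-- from typing import Any, Literal, Sequence
--
-- def extract_label_conflicts(field_names: Sequence[str]) -> list[str]:
--     errors: list[str] = []
--     has_error = any(name.startswith("error.") for name in field_names)
--     has_labels_error = any(
--         name == "labels.error"
--         or name.startswith("labels.error.")
--         or name == "labels.err"
--         or name.startswith("labels.err.")
--         for name in field_names
--     )
--     if has_error and has_labels_error:
--         errors.append(
--             "Avoid duplicating error semantics across 'error.*' and 'labels.error'."
--         )
--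
--     has_http_status = any(
--         name in {"http.response.status_code", "http.status_code"} for name in field_names
--     )
--     has_labels_status = any(
--         name == "labels.status"
--         or name == "labels.status_code"
--         or name.startswith("labels.status.")
--         for name in field_names
--     )
--     if has_http_status and has_labels_status:
--         errors.append(
--             "Avoid duplicating status semantics across HTTP status and labels.status."
--         )
--     return errors
-- ===== SOURCE B (Python) =====
-- from typing import Sequence
--
-- _HTTP_STATUS_FIELDS = ("http.response.status_code", "http.status_code")
--
-- def extract_label_conflicts(field_names: Sequence[str]) -> list[str]:
--     has_error = has_labels_error = has_http_status = has_labels_status = False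
--     for name in field_names:
--         if name.startswith("error."):
--             has_error = True
--         if (name == "labels.error" or name.startswith("labels.error.")
--                 or name == "labels.err" or name.startswith("labels.err.")):
--             has_labels_error = True
--         if name in _HTTP_STATUS_FIELDS:
--             has_http_status = True
--         if (name == "labels.status" or name == "labels.status_code"
--                 or name.startswith("labels.status.")):
--             has_labels_status = True
--     errors: list[str] = []
--     if has_error and has_labels_error:
--         errors.append(
--             "Avoid duplicating error semantics across 'error.*' and 'labels.error'."
--         )
--     if has_http_status and has_labels_status:
--         errors.append(
--             "Avoid duplicating status semantics across HTTP status and labels.status."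
--         )
--     return errors
-- ===== Notes on version B (the rewrite author's own statement) =====
-- stated objective: simpler
-- what changed: Replaces four separate any(...) scans over field_names with a single pass that accumulates four boolean flags and then emits the two messages.
import Mathlib
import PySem

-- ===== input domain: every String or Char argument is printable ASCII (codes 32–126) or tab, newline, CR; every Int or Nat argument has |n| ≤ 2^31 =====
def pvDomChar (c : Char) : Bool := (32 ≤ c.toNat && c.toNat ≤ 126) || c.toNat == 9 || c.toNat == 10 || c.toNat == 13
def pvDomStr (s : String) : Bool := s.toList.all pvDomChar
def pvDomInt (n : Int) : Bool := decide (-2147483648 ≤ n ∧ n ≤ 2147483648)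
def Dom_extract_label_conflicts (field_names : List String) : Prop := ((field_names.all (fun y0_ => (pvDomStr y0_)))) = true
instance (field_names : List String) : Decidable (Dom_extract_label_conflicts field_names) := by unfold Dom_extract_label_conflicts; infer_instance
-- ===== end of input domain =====

-- B replaces A's four separate any(...) scans with a single pass accumulating four flags (objective: simpler decomposition).

-- ===== PORT A =====
-- the four predicates, exactly as A writes them
def pvErrP (name : String) : Bool := PySem.Str.startswith name "error."
def pvLabelsErrP (name : String) : Bool :=
  name == "labels.error" || PySem.Str.startswith name "labels.error."
    || name == "labels.err" || PySem.Str.startswith name "labels.err."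
def pvHttpStatusP (name : String) : Bool :=
  name == "http.response.status_code" || name == "http.status_code"
def pvLabelsStatusP (name : String) : Bool :=
  name == "labels.status" || name == "labels.status_code"
    || PySem.Str.startswith name "labels.status."

def extract_label_conflicts (field_names : List String) : List String :=
  let errors : List String := []
  let has_error := field_names.any pvErrP
  let has_labels_error := field_names.any pvLabelsErrP
  let errors := if has_error && has_labels_error then
      errors ++ ["Avoid duplicating error semantics across 'error.*' and 'labels.error'."]
    else errors
  let has_http_status := field_names.any pvHttpStatusP
  let has_labels_status := field_names.any pvLabelsStatusP
  let errors := if has_http_status && has_labels_status then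
      errors ++ ["Avoid duplicating status semantics across HTTP status and labels.status."]
    else errors
  errors

-- ===== PORT B =====
-- single fold over field_names updating the four flags
def pvStep (st : Bool × Bool × Bool × Bool) (name : String) : Bool × Bool × Bool × Bool :=
  let st := if pvErrP name then (true, st.2.1, st.2.2.1, st.2.2.2) else st
  let st := if pvLabelsErrP name then (st.1, true, st.2.2.1, st.2.2.2) else st
  let st := if pvHttpStatusP name then (st.1, st.2.1, true, st.2.2.2) else st
  let st := if pvLabelsStatusP name then (st.1, st.2.1, st.2.2.1, true) else st
  st

def extract_label_conflicts_alt (field_names : List String) : List String :=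
  let flags := field_names.foldl pvStep (false, false, false, false)
  let errors : List String := []
  let errors := if flags.1 && flags.2.1 then
      errors ++ ["Avoid duplicating error semantics across 'error.*' and 'labels.error'."]
    else errors
  let errors := if flags.2.2.1 && flags.2.2.2 then
      errors ++ ["Avoid duplicating status semantics across HTTP status and labels.status."]
    else errors
  errors

-- ===== PRECONDITION & SPEC =====
def Spec_extract_label_conflicts (field_names : List String) (out : List String) : Prop := out = extract_label_conflicts_alt field_names
instance (field_names : List String) (out : List String) : Decidable (Spec_extract_label_conflicts field_names out) := by unfold Spec_extract_label_conflicts; infer_instance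

-- ===== CLAIM (what is proved, stated in full; the proofs are below) =====
def Claim_equal_extract_label_conflicts : Prop := ∀ (field_names : List String), Dom_extract_label_conflicts field_names → Spec_extract_label_conflicts field_names (extract_label_conflicts field_names)

-- ===== LEMMAS AND PROOFS =====
-- the single fold computes exactly the four 'any' scans, or-ed into the accumulator
theorem pvFold_eq (l : List String) (a b c d : Bool) :
    l.foldl pvStep (a, b, c, d)
      = (a || l.any pvErrP, b || l.any pvLabelsErrP,
         c || l.any pvHttpStatusP, d || l.any pvLabelsStatusP) := by
  induction l generalizing a b c d with
  | nil => simp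
  | cons x xs ih =>
    simp only [List.foldl_cons, List.any_cons, pvStep]
    split_ifs <;> rw [ih] <;> simp_all

-- ===== VERDICT (by name: the statement is the Claim_ definition above) =====
theorem extract_label_conflicts_spec : Claim_equal_extract_label_conflicts := by
  intro field_names _
  unfold Spec_extract_label_conflicts extract_label_conflicts extract_label_conflicts_alt
  simp [pvFold_eq]
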